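-- pv_equiv track=rewrite | github.com/mohammadfaiizan/ProjectI | DSA/Problem/Dynamic Programming/03_Knapsack_Problems/805_Split_Array_With_Same_Average.py | split_array_bitmask_dp
-- ===== SOURCE A (Python) =====
-- def split_array_bitmask_dp(nums, total_sum, valid_sizes):
--     """
--     Bitmask DP for small arrays.
--
--     Time Complexity: O(2^n) - bitmask enumeration
--     Space Complexity: O(2^n) - bitmask storage
--     """
--     n = len(nums)
--
--     # Precompute all subset sums and sizes
--     subset_info = {}  # mask -> (size, sum)
--
--     for mask in range(1, 1 << n):
--         size = bin(mask).count('1')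
--         subset_sum = sum(nums[i] for i in range(n) if mask & (1 << i))
--         subset_info[mask] = (size, subset_sum)
--
--     # Check each valid size
--     for target_size in valid_sizes:
--         target_sum = (target_size * total_sum) // n
--
--         for mask, (size, subset_sum) in subset_info.items():
--             if size == target_size and subset_sum == target_sum:
--                 return True
--
--     return False
-- ===== SOURCE B (Python) =====
-- def split_array_bitmask_dp(nums, total_sum, valid_sizes):
--     n = len(nums)
--     targets = {t: (t * total_sum) // n for t in valid_sizes}
--     info = [(0, 0)]  # info[mask] = (popcount(mask), subset sum of mask), filled in mask order
--     for mask in range(1, 1 << n):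
--         h = mask.bit_length() - 1            # highest set bit: mask - (1 << h) was already computed
--         psize, psum = info[mask - (1 << h)]
--         entry = (psize + 1, psum + nums[h])
--         info.append(entry)
--         if targets.get(entry[0]) == entry[1]:
--             return True
--     return False
-- ===== Notes on version B (the rewrite author's own statement) =====
-- stated objective: faster
-- what changed: Instead of recomputing each mask's popcount and subset sum from scratch (bin().count plus an O(n) generator per mask) and then rescanning all 2^n masks for every valid size, B fills the (size, sum) table incrementally (each mask's entry from the entry of mask minus its highest bit in O(1)) and checks a precomputed size->target dictionary during the single pass; intended as faster (O(1) instead of O(n+k) work per mask) and measured 11.95x at n=16, the largest size at which both programs finished -- both remain exponential in len(nums), so neither finishes at n=64.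
import Mathlib
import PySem

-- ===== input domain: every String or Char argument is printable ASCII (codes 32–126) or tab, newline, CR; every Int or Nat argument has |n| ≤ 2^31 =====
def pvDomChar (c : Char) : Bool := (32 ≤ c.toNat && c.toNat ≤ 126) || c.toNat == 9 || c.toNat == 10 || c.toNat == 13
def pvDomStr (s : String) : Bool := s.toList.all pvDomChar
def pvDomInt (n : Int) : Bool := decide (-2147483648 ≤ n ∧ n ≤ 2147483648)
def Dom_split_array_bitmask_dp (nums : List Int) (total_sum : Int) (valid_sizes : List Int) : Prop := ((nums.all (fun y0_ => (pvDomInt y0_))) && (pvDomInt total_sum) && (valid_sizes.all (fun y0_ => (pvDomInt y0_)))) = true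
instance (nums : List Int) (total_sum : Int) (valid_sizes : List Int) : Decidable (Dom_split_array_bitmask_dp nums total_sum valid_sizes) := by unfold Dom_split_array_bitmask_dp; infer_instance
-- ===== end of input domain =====

-- B replaces A's per-mask popcount + O(n) subset-sum recomputation and per-size rescan of all
-- masks by an incremental DP (entry of mask from mask minus its highest bit) with a precomputed
-- target dictionary checked during the single pass; intended as faster (O(1) instead of O(n+k)
-- work per mask), measured 11.95x at n=16, the largest size where both finished (both stay
-- exponential in len(nums)).

-- ===== PORT A =====
def split_array_bitmask_dp (nums : List Int) (total_sum : Int) (valid_sizes : List Int) : Bool :=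
  let n : Int := nums.length
  -- subset_info: Python dict mask -> (size, sum), kept as the association list in insertion
  -- order; the keys (masks) are pairwise distinct, so each dict assignment appends a new pair.
  let subset_info : List (Int × (Int × Int)) :=
    (PySem.List.pyRange 1 ((1 : Int) <<< nums.length) 1).foldl
      (fun acc mask =>
        let size : Int := PySem.Int.bitCount mask        -- bin(mask).count('1')
        let subset_sum : Int :=
          (((PySem.List.pyRange 0 n 1).filter
              (fun i => PySem.Int.band mask ((1 : Int) <<< i.toNat) != 0)).map
            (fun i => PySem.List.pyGetD nums i 0)).sum   -- 1 << i with i ≥ 0 (i from range(n))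
        acc ++ [(mask, (size, subset_sum))]) []
  -- the two 'for' loops with early 'return True' compute exactly an 'any' over each list
  valid_sizes.any (fun target_size =>
    let target_sum := PySem.Int.floordiv (target_size * total_sum) n
    subset_info.any (fun p => p.2.1 == target_size && p.2.2 == target_sum))

-- ===== PORT B =====
-- the 'for mask in range(1, 1 << n)' loop of Source B; the Python invariant mask == len(info) is
-- used to carry the loop variable: mask is info.length. All list indices hit are in range.
def bInfoLoop (nums : List Int) (targets : PySem.Dict Int Int) (full : Nat)
    (info : List (Int × Int)) : Bool :=
  if info.length < full then
    let mask := info.length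
    let h := PySem.Int.bitLength (mask : Int) - 1            -- mask.bit_length() - 1
    let p := info.getD (mask - (1 <<< h)) (0, 0)             -- info[mask - (1 << h)]
    let entry : Int × Int := (p.1 + 1, p.2 + nums.getD h 0)  -- (psize + 1, psum + nums[h])
    if targets.get? entry.1 == some entry.2 then true        -- targets.get(entry[0]) == entry[1]
    else bInfoLoop nums targets full (info ++ [entry])
  else false
termination_by full - info.length
decreasing_by simp; omega

def split_array_bitmask_dp_alt (nums : List Int) (total_sum : Int) (valid_sizes : List Int) : Bool :=
  let n : Int := nums.length
  let targets : PySem.Dict Int Int :=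
    valid_sizes.foldl (fun d t => d.insert t (PySem.Int.floordiv (t * total_sum) n))
      PySem.Dict.empty
  bInfoLoop nums targets (1 <<< nums.length) [(0, 0)]

-- ===== PRECONDITION & SPEC =====
-- Pre_ excludes exactly the inputs where Python A raises ZeroDivisionError ('// n' with
-- n = len(nums) = 0 and valid_sizes non-empty); Python B raises there too.
def Pre_split_array_bitmask_dp (nums : List Int) (total_sum : Int) (valid_sizes : List Int) : Prop :=
  nums ≠ [] ∨ valid_sizes = []
instance (nums : List Int) (total_sum : Int) (valid_sizes : List Int) : Decidable (Pre_split_array_bitmask_dp nums total_sum valid_sizes) := by unfold Pre_split_array_bitmask_dp; infer_instance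

def pvWitness_split_array_bitmask_dp : List Int × Int × List Int := ([1, 2, 3, 4], 10, [2])

def Spec_split_array_bitmask_dp (nums : List Int) (total_sum : Int) (valid_sizes : List Int) (out : Bool) : Prop := out = split_array_bitmask_dp_alt nums total_sum valid_sizes
instance (nums : List Int) (total_sum : Int) (valid_sizes : List Int) (out : Bool) : Decidable (Spec_split_array_bitmask_dp nums total_sum valid_sizes out) := by unfold Spec_split_array_bitmask_dp; infer_instance

-- ===== CLAIM (what is proved, stated in full; the proofs are below) =====
def Claim_equal_split_array_bitmask_dp : Prop := ∀ (nums : List Int) (total_sum : Int) (valid_sizes : List Int), Dom_split_array_bitmask_dp nums total_sum valid_sizes → Pre_split_array_bitmask_dp nums total_sum valid_sizes → Spec_split_array_bitmask_dp nums total_sum valid_sizes (split_array_bitmask_dp nums total_sum valid_sizes)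

-- ===== LEMMAS AND PROOFS =====

def msize (m : Nat) : Int := (PySem.Int.bitCount (m : Int) : Int)
def msum (nums : List Int) (m : Nat) : Int :=
  ∑ i ∈ Finset.range nums.length, if m.testBit i then nums.getD i 0 else 0

-- dict comprehension lookup
lemma targetsGet (g : Int → Int) (l : List Int) (d : PySem.Dict Int Int) (s : Int) :
    (l.foldl (fun d t => d.insert t (g t)) d).get? s
      = if s ∈ l then some (g s) else d.get? s := by
  induction l generalizing d with
  | nil => simp
  | cons t l ih =>
      simp only [List.foldl_cons, ih, List.mem_cons]
      by_cases hl : s ∈ l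
      · simp [hl]
      · by_cases hst : s = t
        · subst hst; simp [hl, PySem.Dict.get?_insert_self]
        · simp [hl, hst, PySem.Dict.get?_insert_of_ne _ _ hst]

lemma bitCount_add_pow (h : Nat) : ∀ r : Nat, r < 2^h →
    PySem.Int.bitCount ((2^h + r : Nat) : Int) = PySem.Int.bitCount (r : Int) + 1 := by
  induction h with
  | zero => intro r hr; interval_cases r; decide
  | succ h ih =>
      intro r hr
      rw [PySem.Int.bitCount_natCast (m := 2^(h+1) + r) (by positivity)]
      have hdiv : (2^(h+1) + r) / 2 = 2^h + r/2 := by omega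
      have hmod : (2^(h+1) + r) % 2 = r % 2 := by omega
      rw [hdiv, hmod, ih (r/2) (by omega)]
      rcases Nat.eq_zero_or_pos r with h0 | hp
      · subst h0; simp
      · rw [PySem.Int.bitCount_natCast hp]; ring

lemma bl_decomp (m : Nat) (hm : 1 ≤ m) :
    2^(PySem.Int.bitLength (m : Int) - 1) ≤ m ∧ m < 2 * 2^(PySem.Int.bitLength (m : Int) - 1) := by
  have h1 := PySem.Int.two_pow_bitLength_le (m : Int) (by positivity)
  have h2 := PySem.Int.lt_two_pow_bitLength (m : Int)
  simp only [Int.natAbs_natCast] at h1 h2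
  have hbl : 1 ≤ PySem.Int.bitLength (m : Int) := by
    by_contra hc
    have : PySem.Int.bitLength (m : Int) = 0 := by omega
    rw [this] at h2; simp at h2; omega
  constructor
  · exact h1
  · calc m < 2 ^ PySem.Int.bitLength (m : Int) := h2
      _ = 2 * 2^(PySem.Int.bitLength (m : Int) - 1) := by
          rw [← pow_succ']
          congr 1; omega

lemma testBit_high (h r : Nat) (hr : r < 2^h) : (2^h + r).testBit h = true := by
  rw [Nat.testBit_two_pow_add_eq, Nat.testBit_lt_two_pow hr]; rfl

lemma testBit_other (h r i : Nat) (hr : r < 2^h) (hi : i ≠ h) :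
    (2^h + r).testBit i = r.testBit i := by
  rcases Nat.lt_or_ge i h with hlt | hgt
  · exact Nat.testBit_two_pow_add_gt hlt r
  · have hih : h < i := by omega
    rw [Nat.testBit_lt_two_pow (by calc 2^h + r < 2^h + 2^h := by omega
          _ = 2^(h+1) := by ring
          _ ≤ 2^i := Nat.pow_le_pow_right (by norm_num) (by omega)),
        Nat.testBit_lt_two_pow (by calc r < 2^h := hr
          _ ≤ 2^i := Nat.pow_le_pow_right (by norm_num) (by omega))]

lemma msum_add_pow (nums : List Int) (h r : Nat) (hr : r < 2^h) (hlen : h < nums.length) :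
    msum nums (2^h + r) = msum nums r + nums.getD h 0 := by
  unfold msum
  have key : ∀ i ∈ Finset.range nums.length,
      (if (2^h + r).testBit i then nums.getD i 0 else 0)
        = (if r.testBit i then nums.getD i 0 else 0) + (if i = h then nums.getD h 0 else 0) := by
    intro i _
    by_cases hih : i = h
    · subst hih
      rw [testBit_high _ r hr, Nat.testBit_lt_two_pow hr]
      simp
    · rw [testBit_other h r i hr hih]
      simp [hih]
  rw [Finset.sum_congr rfl key, Finset.sum_add_distrib]
  simp [Finset.sum_ite_eq', hlen]

-- combined step facts for mask ≥ 1 with hb := bit_length - 1, rest := mask - 2^hb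
lemma step_facts (m : Nat) (hm : 1 ≤ m) :
    m - (1 <<< (PySem.Int.bitLength (m : Int) - 1)) < 2^(PySem.Int.bitLength (m : Int) - 1) ∧
    m = 2^(PySem.Int.bitLength (m : Int) - 1) + (m - (1 <<< (PySem.Int.bitLength (m : Int) - 1))) ∧
    m - (1 <<< (PySem.Int.bitLength (m : Int) - 1)) < m := by
  obtain ⟨h1, h2⟩ := bl_decomp m hm
  have hs : (1 : Nat) <<< (PySem.Int.bitLength (m : Int) - 1) = 2^(PySem.Int.bitLength (m : Int) - 1) :=
    Nat.one_shiftLeft _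
  have hpos : 0 < 2^(PySem.Int.bitLength (m : Int) - 1) := by positivity
  refine ⟨by omega, by omega, by omega⟩

lemma msize_zero : msize 0 = 0 := by decide
lemma msum_zero (nums : List Int) : msum nums 0 = 0 := by
  unfold msum; simp

-- A's per-mask subset sum equals msum
lemma subsum_eq (nums : List Int) (m : Nat) :
    (((PySem.List.pyRange 0 (nums.length : Int) 1).filter
        (fun i => PySem.Int.band (m : Int) ((1 : Int) <<< i.toNat) != 0)).map
      (fun i => PySem.List.pyGetD nums i 0)).sum = msum nums m := by
  rw [PySem.List.pyRange_zero_nat, List.filter_map, List.map_map]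
  have hpred : ((fun i => PySem.Int.band (m : Int) ((1 : Int) <<< i.toNat) != 0) ∘ (fun k : Nat => (k : Int)))
      = fun k : Nat => m.testBit k := by
    funext k
    simp only [Function.comp]
    have hsh : ((1 : Int) <<< ((((k : Int)).toNat : Nat) : Int)) = ((2^k : Nat) : Int) := by
      rw [Int.toNat_natCast]; exact Int.one_shiftLeft k
    rw [hsh, PySem.Int.band_natCast, Nat.and_two_pow]
    rcases hbit : m.testBit k <;> simp_all
  rw [hpred]
  have hmap : ((fun i => PySem.List.pyGetD nums i 0) ∘ (fun k : Nat => (k : Int)))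
      = fun k : Nat => nums.getD k 0 := by
    funext k; simp [Function.comp]
  rw [hmap]
  unfold msum
  induction nums.length with
  | zero => simp
  | succ n ih =>
      rw [List.range_succ, List.filter_append, List.map_append, List.sum_append,
          Finset.sum_range_succ, ih]
      by_cases hb : m.testBit n <;> simp [hb]

lemma one_shl_nat (n : Nat) : (1 : Int) <<< n = ((2^n : Nat) : Int) := by
  rw [← Int.shiftLeft_natCast_right]
  exact Int.one_shiftLeft n

lemma A_iff (nums : List Int) (ts : Int) (vs : List Int) :
    split_array_bitmask_dp nums ts vs = true ↔
      ∃ t ∈ vs, ∃ m : Nat, 1 ≤ m ∧ m < 2^nums.length ∧ msize m = t ∧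
        msum nums m = PySem.Int.floordiv (t * ts) (nums.length : Int) := by
  unfold split_array_bitmask_dp
  dsimp only
  rw [PySem.List.foldl_append_singleton_eq_map
        (fun mask => (mask, ((PySem.Int.bitCount mask : Int),
          (((PySem.List.pyRange 0 (nums.length : Int) 1).filter
              (fun i => PySem.Int.band mask ((1 : Int) <<< i.toNat) != 0)).map
            (fun i => PySem.List.pyGetD nums i 0)).sum)))]
  simp only [List.nil_append, List.any_map, List.any_eq_true, PySem.List.mem_pyRange_one,
    Function.comp, Bool.and_eq_true, beq_iff_eq]
  constructor
  · rintro ⟨t, ht, x, ⟨hx1, hx2⟩, hsz, hsm⟩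
    rw [one_shl_nat] at hx2
    have hx : x = ((x.toNat : Nat) : Int) := by omega
    rw [hx] at hsz hsm
    rw [subsum_eq nums x.toNat] at hsm
    exact ⟨t, ht, x.toNat, by omega, by omega, hsz, hsm⟩
  · rintro ⟨t, ht, m, hm1, hm2, hsz, hsm⟩
    refine ⟨t, ht, (m : Int), ⟨by omega, ?_⟩, ?_, ?_⟩
    · rw [one_shl_nat]; exact_mod_cast hm2
    · exact hsz
    · rw [subsum_eq nums m]; exact hsm

lemma entry_correct (nums : List Int) (m : Nat) (hm : 1 ≤ m) (hlt : m < 2^nums.length) :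
    msize (m - (1 <<< (PySem.Int.bitLength (m : Int) - 1))) + 1 = msize m ∧
    msum nums (m - (1 <<< (PySem.Int.bitLength (m : Int) - 1)))
        + nums.getD (PySem.Int.bitLength (m : Int) - 1) 0 = msum nums m := by
  obtain ⟨hr, hdecomp, hlt'⟩ := step_facts m hm
  have hblen : PySem.Int.bitLength (m : Int) - 1 < nums.length := by
    by_contra hc
    have h2 : 2 ^ nums.length ≤ 2 ^ (PySem.Int.bitLength (m : Int) - 1) :=
      Nat.pow_le_pow_right (by norm_num) (by omega)
    obtain ⟨hle, _⟩ := bl_decomp m hm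
    omega
  constructor
  · unfold msize
    conv_rhs => rw [hdecomp]
    rw [bitCount_add_pow _ _ hr]
    push_cast
    ring
  · conv_rhs => rw [hdecomp]
    rw [msum_add_pow nums _ _ hr hblen]

lemma bLoop_iff (nums : List Int) (targets : PySem.Dict Int Int) :
    ∀ (fuel : Nat) (info : List (Int × Int)),
      1 ≤ info.length → info.length ≤ 2^nums.length →
      2^nums.length - info.length ≤ fuel →
      (∀ j : Nat, j < info.length → info.getD j (0,0) = (msize j, msum nums j)) →
      (bInfoLoop nums targets (1 <<< nums.length) info = true ↔
        ∃ m : Nat, info.length ≤ m ∧ m < 2^nums.length ∧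
          targets.get? (msize m) = some (msum nums m)) := by
  intro fuel
  induction fuel with
  | zero =>
      intro info h1 h2 h3 hinv
      have hstop : ¬ (info.length < 1 <<< nums.length) := by
        rw [Nat.one_shiftLeft]; omega
      rw [bInfoLoop, if_neg hstop]
      constructor
      · intro h; simp at h
      · rintro ⟨m, hm1, hm2, -⟩
        exact ((by omega : False)).elim
  | succ fuel ih =>
      intro info h1 h2 h3 hinv
      by_cases hcond : info.length < 2^nums.length
      · have hcond' : info.length < 1 <<< nums.length := by rw [Nat.one_shiftLeft]; omega
        rw [bInfoLoop, if_pos hcond']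
        dsimp only
        obtain ⟨hr, hdecomp, hlt'⟩ := step_facts info.length h1
        have hp : info.getD (info.length - 1 <<< (PySem.Int.bitLength (info.length : Int) - 1)) (0,0)
            = (msize (info.length - 1 <<< (PySem.Int.bitLength (info.length : Int) - 1)),
               msum nums (info.length - 1 <<< (PySem.Int.bitLength (info.length : Int) - 1))) :=
          hinv _ (by omega)
        rw [hp]
        obtain ⟨he1, he2⟩ := entry_correct nums info.length h1 hcond
        rw [he1, he2]
        by_cases hbeq : targets.get? (msize info.length) = some (msum nums info.length)
        · rw [if_pos (by simpa using hbeq)]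
          simp only [true_iff]
          exact ⟨info.length, le_refl _, hcond, hbeq⟩
        · rw [if_neg (by simpa using hbeq)]
          rw [ih (info ++ [(msize info.length, msum nums info.length)])
                (by simp) (by simp only [List.length_append, List.length_cons, List.length_nil]; omega) (by simp only [List.length_append, List.length_cons, List.length_nil]; omega) ?_]
          · constructor
            · rintro ⟨m, hm1, hm2, hm3⟩
              exact ⟨m, by simp at hm1; omega, hm2, hm3⟩
            · rintro ⟨m, hm1, hm2, hm3⟩
              refine ⟨m, ?_, hm2, hm3⟩
              simp only [List.length_append, List.length_cons, List.length_nil]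
              rcases Nat.eq_or_lt_of_le hm1 with heq | hlt2
              · exfalso; rw [← heq] at hm3; exact hbeq hm3
              · omega
          · intro j hj
            simp only [List.length_append, List.length_cons, List.length_nil] at hj
            rcases Nat.lt_or_ge j info.length with hjl | hjg
            · rw [List.getD_append _ _ _ _ hjl]
              exact hinv j hjl
            · have hje : j = info.length := by omega
              subst hje
              rw [List.getD_append_right _ _ _ _ hjg]
              simp
      · have hstop : ¬ (info.length < 1 <<< nums.length) := by
          rw [Nat.one_shiftLeft]; omega
        rw [bInfoLoop, if_neg hstop]
        constructor
        · intro h; simp at h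
        · rintro ⟨m, hm1, hm2, -⟩
          exact ((by omega : False)).elim

lemma B_iff (nums : List Int) (ts : Int) (vs : List Int) :
    split_array_bitmask_dp_alt nums ts vs = true ↔
      ∃ m : Nat, 1 ≤ m ∧ m < 2^nums.length ∧ msize m ∈ vs ∧
        PySem.Int.floordiv (msize m * ts) (nums.length : Int) = msum nums m := by
  unfold split_array_bitmask_dp_alt
  dsimp only
  rw [bLoop_iff nums _ (2^nums.length) [(0,0)]
        (by simp)
        (by simpa using Nat.one_le_two_pow)
        (by simp)
        (by intro j hj
            simp only [List.length_cons, List.length_nil] at hj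
            interval_cases j
            simp [msize_zero, msum_zero])]
  simp only [List.length_cons, List.length_nil]
  constructor
  · rintro ⟨m, hm1, hm2, hget⟩
    rw [targetsGet] at hget
    by_cases hmem : msize m ∈ vs
    · rw [if_pos hmem] at hget
      exact ⟨m, hm1, hm2, hmem, by simpa using hget⟩
    · rw [if_neg hmem] at hget
      simp [PySem.Dict.empty, PySem.Dict.get?] at hget
  · rintro ⟨m, hm1, hm2, hmem, hval⟩
    refine ⟨m, hm1, hm2, ?_⟩
    rw [targetsGet, if_pos hmem, hval]

theorem main_equiv (nums : List Int) (ts : Int) (vs : List Int) :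
    split_array_bitmask_dp nums ts vs = split_array_bitmask_dp_alt nums ts vs := by
  rw [Bool.eq_iff_iff, A_iff, B_iff]
  constructor
  · rintro ⟨t, ht, m, hm1, hm2, hsz, hsm⟩
    exact ⟨m, hm1, hm2, hsz ▸ ht, hsz ▸ hsm.symm⟩
  · rintro ⟨m, hm1, hm2, hmem, hval⟩
    exact ⟨msize m, hmem, m, hm1, hm2, rfl, hval.symm⟩


-- ===== VERDICT (by name: the statement is the Claim_ definition above) =====
theorem split_array_bitmask_dp_spec : Claim_equal_split_array_bitmask_dp := by
  intro nums total_sum valid_sizes _ _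
  unfold Spec_split_array_bitmask_dp
  exact main_equiv nums total_sum valid_sizes
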